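-- pv_equiv track=rewrite | github.com/Wh1isper/netherbrain | netherbrain/agent_runtime/execution/input.py | _classify_mime
-- ===== SOURCE A (Python) =====
-- _IMAGE_PREFIXES = ("image/",)
--
-- _AUDIO_PREFIXES = ("audio/",)
--
-- _VIDEO_PREFIXES = ("video/",)
--
-- _DOCUMENT_TYPES = {
--     "application/pdf",
--     "text/plain",
--     "text/html",
--     "text/csv",
--     "text/markdown",
--     "application/json",
-- }
--
-- def _classify_mime(mime: str | None) -> str:
--     """Classify MIME type into a content category.
--
--     Returns one of: 'image', 'audio', 'video', 'document', 'binary'.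
--     """
--     if mime is None:
--         return "binary"
--
--     mime_lower = mime.lower().split(";")[0].strip()
--
--     if any(mime_lower.startswith(p) for p in _IMAGE_PREFIXES):
--         return "image"
--     if any(mime_lower.startswith(p) for p in _AUDIO_PREFIXES):
--         return "audio"
--     if any(mime_lower.startswith(p) for p in _VIDEO_PREFIXES):
--         return "video"
--     if mime_lower in _DOCUMENT_TYPES or mime_lower.startswith("text/"):
--         return "document"
--     return "binary"
-- ===== SOURCE B (Python) =====
-- _DOCUMENT_TYPES = {
--     "application/pdf",
--     "text/plain",
--     "text/html",
--     "text/csv",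
--     "text/markdown",
--     "application/json",
-- }
--
-- _MAJOR_CATEGORIES = {
--     "image": "image",
--     "audio": "audio",
--     "video": "video",
--     "text": "document",
-- }
--
--
-- def _classify_mime(mime):
--     """Classify MIME type into a content category via a major-type table lookup."""
--     if mime is None:
--         return "binary"
--
--     t = mime.lower().split(";")[0].strip()
--     major, sep, _ = t.partition("/")
--     if sep:
--         cat = _MAJOR_CATEGORIES.get(major)
--         if cat is not None:
--             return cat
--     if t in _DOCUMENT_TYPES:
--         return "document"
--     return "binary"
-- ===== Notes on version B (the rewrite author's own statement) =====
-- stated objective: idiomatic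
-- what changed: Replaces A's sequential any(startswith) scans over prefix tuples by one str.partition at the first slash and a single dict lookup of the major type's category, falling back to the document-set membership test.
import Mathlib
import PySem

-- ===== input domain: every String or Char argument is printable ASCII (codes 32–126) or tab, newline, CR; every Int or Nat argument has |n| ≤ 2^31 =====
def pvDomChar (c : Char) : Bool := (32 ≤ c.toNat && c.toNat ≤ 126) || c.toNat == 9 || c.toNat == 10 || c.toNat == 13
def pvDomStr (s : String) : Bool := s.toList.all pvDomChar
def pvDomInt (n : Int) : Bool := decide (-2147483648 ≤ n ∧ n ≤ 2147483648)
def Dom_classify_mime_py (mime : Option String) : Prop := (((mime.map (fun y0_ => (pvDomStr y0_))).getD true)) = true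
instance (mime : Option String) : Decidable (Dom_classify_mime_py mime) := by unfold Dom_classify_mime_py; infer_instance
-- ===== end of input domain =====

-- B replaces A's sequential any(startswith) prefix scans by a partition on '/' and a
-- table lookup of the major type (objective: idiomatic); return values are identical.


-- ===== PORT A =====
def pvImagePrefixes : List String := ["image/"]
def pvAudioPrefixes : List String := ["audio/"]
def pvVideoPrefixes : List String := ["video/"]
def pvDocumentTypes : List String :=
  ["application/pdf", "text/plain", "text/html", "text/csv", "text/markdown", "application/json"]

def classify_mime_py (mime : Option String) : String :=
  match mime with
  | none => "binary"
  | some m =>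
    -- mime.lower().split(";")[0].strip(); split(";") is never empty, so [0] is its head
    let mimeLower := PySem.Str.strip (((PySem.Str.split? (PySem.Str.lower m) ";").getD []).headD "")
    if pvImagePrefixes.any (fun p => PySem.Str.startswith mimeLower p) then "image"
    else if pvAudioPrefixes.any (fun p => PySem.Str.startswith mimeLower p) then "audio"
    else if pvVideoPrefixes.any (fun p => PySem.Str.startswith mimeLower p) then "video"
    else if pvDocumentTypes.contains mimeLower || PySem.Str.startswith mimeLower "text/" then "document"
    else "binary"

-- ===== PORT B =====
def pvMajorCategories : PySem.Dict String String :=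
  PySem.Dict.ofList [("image", "image"), ("audio", "audio"), ("video", "video"), ("text", "document")]

def classify_mime_py_alt (mime : Option String) : String :=
  match mime with
  | none => "binary"
  | some m =>
    let t := PySem.Str.strip (((PySem.Str.split? (PySem.Str.lower m) ";").getD []).headD "")
    -- t.partition("/"), ported by hand (exact: split at the first '/'; sep nonempty iff '/' occurs)
    let major := String.ofList (t.toList.takeWhile (fun c => c ≠ '/'))
    let sep := t.toList.dropWhile (fun c => c ≠ '/')
    if sep ≠ [] then
      match pvMajorCategories.get? major with
      | some cat => cat
      | none => if pvDocumentTypes.contains t then "document" else "binary"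
    else if pvDocumentTypes.contains t then "document" else "binary"

-- ===== PRECONDITION & SPEC =====
def Spec_classify_mime_py (mime : Option String) (out : String) : Prop := out = classify_mime_py_alt mime
instance (mime : Option String) (out : String) : Decidable (Spec_classify_mime_py mime out) := by unfold Spec_classify_mime_py; infer_instance

-- ===== CLAIM (what is proved, stated in full; the proofs are below) =====
def Claim_equal_classify_mime_py : Prop := ∀ (mime : Option String), Dom_classify_mime_py mime → Spec_classify_mime_py mime (classify_mime_py mime)

-- ===== LEMMAS AND PROOFS =====

-- startswith (p ++ "/") ↔ partition at '/' yields major = p with a nonempty separator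
theorem pv_prefix_slash_iff (p l : List Char) (hp : '/' ∉ p) :
    (p ++ ['/']) <+: l ↔
      (l.takeWhile (fun c => c ≠ '/') = p ∧ l.dropWhile (fun c => c ≠ '/') ≠ []) := by
  induction l generalizing p with
  | nil => simp
  | cons c l ih =>
    by_cases hc : c = '/'
    · subst hc
      rw [List.takeWhile_cons_of_neg (by simp), List.dropWhile_cons_of_neg (by simp)]
      cases p with
      | nil => simp
      | cons q p' =>
        have hq : q ≠ '/' := fun h => hp (h ▸ List.mem_cons_self)
        simp only [List.cons_append, List.cons_prefix_cons]
        constructor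
        · rintro ⟨h, -⟩; exact absurd h hq
        · rintro ⟨h, -⟩; simp at h
    · rw [List.takeWhile_cons_of_pos (by simp [hc]), List.dropWhile_cons_of_pos (by simp [hc])]
      cases p with
      | nil =>
        simp only [List.nil_append, List.cons_prefix_cons]
        constructor
        · rintro ⟨h, -⟩; exact absurd h.symm hc
        · rintro ⟨h, -⟩; simp at h
      | cons q p' =>
        have hp' : '/' ∉ p' := fun h => hp (List.mem_cons_of_mem _ h)
        simp only [List.cons_append, List.cons_prefix_cons, List.cons.injEq]
        constructor
        · rintro ⟨rfl, h⟩
          have := (ih p' hp').mp h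
          exact ⟨⟨rfl, this.1⟩, this.2⟩
        · rintro ⟨⟨rfl, h1⟩, h2⟩
          exact ⟨rfl, (ih p' hp').mpr ⟨h1, h2⟩⟩

theorem pv_startswith_slash (l p : List Char) (hp : '/' ∉ p) :
    PySem.Chars.startswith l (p ++ ['/']) =
      decide (l.takeWhile (fun c => c ≠ '/') = p ∧ l.dropWhile (fun c => c ≠ '/') ≠ []) := by
  have h1 := PySem.Chars.startswith_iff l (p ++ ['/'])
  have h2 := pv_prefix_slash_iff p l hp
  rcases Decidable.em ((p ++ ['/']) <+: l) with hpre | hpre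
  · rw [h1.mpr hpre, eq_comm, decide_eq_true_eq]
    exact h2.mp hpre
  · have hf : PySem.Chars.startswith l (p ++ ['/']) = false := by
      rcases Bool.eq_false_or_eq_true (PySem.Chars.startswith l (p ++ ['/'])) with hb | hb
      · exact absurd (h1.mp hb) hpre
      · exact hb
    rw [hf, eq_comm, decide_eq_false_iff_not]
    exact fun hcon => hpre (h2.mpr hcon)

-- the literal major-type dictionary, looked up away from its keys
theorem pv_get_none (k : String) (e1 : k ≠ "image") (e2 : k ≠ "audio") (e3 : k ≠ "video")
    (e4 : k ≠ "text") : pvMajorCategories.get? k = none := by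
  have hdict : pvMajorCategories =
      PySem.Dict.mk [("image", "image"), ("audio", "audio"), ("video", "video"),
        ("text", "document")] := by decide
  rw [hdict, PySem.Dict.get?_mk_cons, PySem.Dict.get?_mk_cons, PySem.Dict.get?_mk_cons,
    PySem.Dict.get?_mk_cons]
  simp [Ne.symm e1, Ne.symm e2, Ne.symm e3, Ne.symm e4, PySem.Dict.get?]

-- the core equality on the normalized string
theorem pv_core (t : String) :
    (if pvImagePrefixes.any (fun p => PySem.Str.startswith t p) then "image"
     else if pvAudioPrefixes.any (fun p => PySem.Str.startswith t p) then "audio"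
     else if pvVideoPrefixes.any (fun p => PySem.Str.startswith t p) then "video"
     else if pvDocumentTypes.contains t || PySem.Str.startswith t "text/" then "document"
     else "binary")
    =
    (let major := String.ofList (t.toList.takeWhile (fun c => c ≠ '/'))
     let sep := t.toList.dropWhile (fun c => c ≠ '/')
     if sep ≠ [] then
       match pvMajorCategories.get? major with
       | some cat => cat
       | none => if pvDocumentTypes.contains t then "document" else "binary"
     else if pvDocumentTypes.contains t then "document" else "binary") := by
  set mj := t.toList.takeWhile (fun c => c ≠ '/') with hmj
  set sp := t.toList.dropWhile (fun c => c ≠ '/') with hsp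
  have himg : PySem.Str.startswith t "image/" = decide (mj = "image".toList ∧ sp ≠ []) := by
    rw [PySem.Str.startswith_eq,
      show ("image/" : String).toList = "image".toList ++ ['/'] from by decide]
    exact pv_startswith_slash t.toList "image".toList (by decide)
  have haud : PySem.Str.startswith t "audio/" = decide (mj = "audio".toList ∧ sp ≠ []) := by
    rw [PySem.Str.startswith_eq,
      show ("audio/" : String).toList = "audio".toList ++ ['/'] from by decide]
    exact pv_startswith_slash t.toList "audio".toList (by decide)
  have hvid : PySem.Str.startswith t "video/" = decide (mj = "video".toList ∧ sp ≠ []) := by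
    rw [PySem.Str.startswith_eq,
      show ("video/" : String).toList = "video".toList ++ ['/'] from by decide]
    exact pv_startswith_slash t.toList "video".toList (by decide)
  have htxt : PySem.Str.startswith t "text/" = decide (mj = "text".toList ∧ sp ≠ []) := by
    rw [PySem.Str.startswith_eq,
      show ("text/" : String).toList = "text".toList ++ ['/'] from by decide]
    exact pv_startswith_slash t.toList "text".toList (by decide)
  simp only [pvImagePrefixes, pvAudioPrefixes, pvVideoPrefixes, List.any_cons, List.any_nil,
    Bool.or_false, himg, haud, hvid, htxt]
  by_cases hs : sp ≠ []
  · by_cases h1 : mj = "image".toList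
    · have hg : pvMajorCategories.get? "image" = some "image" := by decide
      simp [hs, h1, hg]
    · by_cases h2 : mj = "audio".toList
      · have hg : pvMajorCategories.get? "audio" = some "audio" := by decide
        simp [hs, h2, hg]
      · by_cases h3 : mj = "video".toList
        · have hg : pvMajorCategories.get? "video" = some "video" := by decide
          simp [hs, h3, hg]
        · by_cases h4 : mj = "text".toList
          · have hg : pvMajorCategories.get? "text" = some "document" := by decide
            simp [hs, h4, hg]
          · have hg : pvMajorCategories.get? (String.ofList mj) = none := by
              refine pv_get_none _ (fun h => h1 ?_) (fun h => h2 ?_) (fun h => h3 ?_)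
                  (fun h => h4 ?_) <;>
                rw [← String.toList_ofList (l := mj), h] <;> decide
            have h1' : ¬mj = ['i', 'm', 'a', 'g', 'e'] := fun h => h1 (by rw [h]; decide)
            have h2' : ¬mj = ['a', 'u', 'd', 'i', 'o'] := fun h => h2 (by rw [h]; decide)
            have h3' : ¬mj = ['v', 'i', 'd', 'e', 'o'] := fun h => h3 (by rw [h]; decide)
            have h4' : ¬mj = ['t', 'e', 'x', 't'] := fun h => h4 (by rw [h]; decide)
            simp [hs, h1', h2', h3', h4', hg]
  · simp [hs]

-- ===== VERDICT (by name: the statement is the Claim_ definition above) =====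
theorem classify_mime_py_spec : Claim_equal_classify_mime_py := by
  intro mime _
  unfold Spec_classify_mime_py classify_mime_py classify_mime_py_alt
  cases mime with
  | none => rfl
  | some m =>
    simp only
    exact pv_core _
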